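-- pv_equiv track=rewrite | github.com/Kirros/codeeval | src/workingexp.py | process_intervals
-- ===== SOURCE A (Python) =====
-- def bound(number, bottom_bound, top_bound):
--     return max(bottom_bound, min(top_bound, number))
--
-- def process_intervals(intervals):
--     number_of_months = 0
--     for i in range(len(intervals)):
--         (start, end) = intervals[i]
--         interval = [1] * (end - start + 1)
--         for other in intervals[i+1:]:
--             (other_start, other_end) = other
--             interval_start = bound(other_start - start, 0, len(interval))
--             interval_end = bound(other_end - start + 1, 0, len(interval))
--             for month in range(interval_start, interval_end):
--                 interval[month] = 0
--         number_of_months += sum(interval)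
--     return number_of_months
-- ===== SOURCE B (Python) =====
-- def process_intervals(intervals):
--     ivs = sorted([p for p in intervals if p[0] <= p[1]], key=lambda p: p[0])
--     total = 0
--     cur = None
--     for (s, e) in ivs:
--         if cur is None:
--             cur = (s, e)
--         elif s <= cur[1] + 1:
--             if e > cur[1]:
--                 cur = (cur[0], e)
--         else:
--             total += cur[1] - cur[0] + 1
--             cur = (s, e)
--     if cur is not None:
--         total += cur[1] - cur[0] + 1
--     return total
-- ===== Notes on version B (the rewrite author's own statement) =====
-- stated objective: faster
-- what changed: Replaces the per-interval month array with quadratic masking by later intervals by a sort-by-start merge sweep that sums the lengths of the merged union blocks.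
import Mathlib
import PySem

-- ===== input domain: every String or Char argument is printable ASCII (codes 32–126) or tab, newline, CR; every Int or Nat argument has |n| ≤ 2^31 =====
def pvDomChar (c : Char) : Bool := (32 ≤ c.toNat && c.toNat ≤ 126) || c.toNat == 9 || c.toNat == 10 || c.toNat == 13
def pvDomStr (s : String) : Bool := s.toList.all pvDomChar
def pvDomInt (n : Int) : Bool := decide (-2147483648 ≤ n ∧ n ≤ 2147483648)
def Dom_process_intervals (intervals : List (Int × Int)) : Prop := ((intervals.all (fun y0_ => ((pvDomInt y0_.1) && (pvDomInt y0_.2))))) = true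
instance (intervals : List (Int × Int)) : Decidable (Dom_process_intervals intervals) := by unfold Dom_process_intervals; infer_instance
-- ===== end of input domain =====

-- B replaces A's per-interval month-array masking (quadratic in the number of
-- intervals) by a sort-by-start merge sweep summing the merged block lengths (objective: faster).

-- ===== PORT A =====
def bound (number : Int) (bottom_bound : Int) (top_bound : Int) : Int :=
  max bottom_bound (min top_bound number)

-- the inner 'for other in intervals[i+1:]' body: clamp the other interval to the
-- current one and write zeros over the overlapped months.  The Python list
-- 'interval' is ported as an Array (a Python list is a mutable array).
-- 'interval[month] = 0' : here month ∈ range(interval_start, interval_end) with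
-- interval_start ≥ 0 (bound's bottom is 0) and interval_end ≤ len(interval),
-- so the index is always in bounds and 'Array.setIfInBounds month.toNat 0' is exact.
def piMask (start : Int) (itv : Array Int) (other : Int × Int) : Array Int :=
  let interval_start := bound (other.1 - start) 0 (itv.size : Int)
  let interval_end := bound (other.2 - start + 1) 0 (itv.size : Int)
  (PySem.List.pyRange interval_start interval_end 1).foldl
    (fun l month => l.setIfInBounds month.toNat 0) itv

-- 'for i in range(len(intervals))' uses exactly intervals[i] and intervals[i+1:],
-- rendered as structural recursion over suffixes (head = intervals[i], tail = intervals[i+1:]).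
-- '[1] * (end - start + 1)' is Array.replicate (end - start + 1).toNat 1 (Python's * clamps at 0);
-- 'sum(interval)' is the left fold of + over the array, starting at 0.
def piLoop : Int → List (Int × Int) → Int
  | number_of_months, [] => number_of_months
  | number_of_months, (start, «end») :: rest =>
      let interval : Array Int := Array.replicate («end» - start + 1).toNat 1
      let interval := rest.foldl (piMask start) interval
      piLoop (number_of_months + interval.foldl (· + ·) 0) rest

def process_intervals (intervals : List (Int × Int)) : Int :=
  piLoop 0 intervals

-- ===== PORT B =====
-- the loop body of Source B; state = (total, cur)
def bStep (st : Int × Option (Int × Int)) (p : Int × Int) : Int × Option (Int × Int) :=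
  match st.2 with
  | none => (st.1, some p)
  | some (cs, ce) =>
      if p.1 ≤ ce + 1 then
        if p.2 > ce then (st.1, some (cs, p.2)) else (st.1, some (cs, ce))
      else (st.1 + (ce - cs + 1), some p)

-- the trailing 'if cur is not None: total += cur[1] - cur[0] + 1'
def bFinish (st : Int × Option (Int × Int)) : Int :=
  match st.2 with
  | none => st.1
  | some (cs, ce) => st.1 + (ce - cs + 1)

def process_intervals_alt (intervals : List (Int × Int)) : Int :=
  let ivs := PySem.List.sorted (intervals.filter (fun p => decide (p.1 ≤ p.2)))
      (fun p => p.1) false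
  bFinish (ivs.foldl bStep (0, none))

-- ===== PRECONDITION & SPEC =====
def Spec_process_intervals (intervals : List (Int × Int)) (out : Int) : Prop := out = process_intervals_alt intervals
instance (intervals : List (Int × Int)) (out : Int) : Decidable (Spec_process_intervals intervals out) := by unfold Spec_process_intervals; infer_instance

-- ===== CLAIM (what is proved, stated in full; the proofs are below) =====
def Claim_equal_process_intervals : Prop := ∀ (intervals : List (Int × Int)), Dom_process_intervals intervals → Spec_process_intervals intervals (process_intervals intervals)

-- ===== LEMMAS AND PROOFS =====

-- integer interval [a, b] as a computable Finset
def iccZ (a b : Int) : Finset Int :=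
  (Finset.range (b + 1 - a).toNat).image (fun k : Nat => a + (k : Int))

-- the set of months covered by the union of the intervals
def covF : List (Int × Int) → Finset Int
  | [] => ∅
  | p :: rest => iccZ p.1 p.2 ∪ covF rest

lemma mem_iccZ (a b m : Int) : m ∈ iccZ a b ↔ a ≤ m ∧ m ≤ b := by
  simp only [iccZ, Finset.mem_image, Finset.mem_range]
  constructor
  · rintro ⟨k, hk, rfl⟩; omega
  · rintro ⟨h1, h2⟩; exact ⟨(m - a).toNat, by omega, by omega⟩

lemma addNat_injective (a : Int) : Function.Injective (fun k : Nat => a + (k : Int)) := by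
  intro x y h; simp only at h; omega

lemma card_iccZ (a b : Int) (h : a ≤ b) : ((iccZ a b).card : Int) = b - a + 1 := by
  unfold iccZ
  rw [Finset.card_image_of_injective _ (addNat_injective a), Finset.card_range]
  omega

lemma mem_covF (xs : List (Int × Int)) (m : Int) :
    m ∈ covF xs ↔ ∃ p ∈ xs, p.1 ≤ m ∧ m ≤ p.2 := by
  induction xs with
  | nil => simp [covF]
  | cons q rest ih => simp [covF, ih, mem_iccZ]

lemma size_foldl_set (ms : List Int) : ∀ itv : Array Int,
    (ms.foldl (fun l m => l.setIfInBounds m.toNat 0) itv).size = itv.size := by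
  induction ms with
  | nil => intro itv; rfl
  | cons m ms ih => intro itv; rw [List.foldl_cons, ih, Array.size_setIfInBounds]

lemma getElem?_zeroRange (n : Nat) : ∀ (a b : Int), (b - a).toNat = n → 0 ≤ a →
    ∀ (itv : Array Int) (k : Nat), k < itv.size →
    ((PySem.List.pyRange a b 1).foldl (fun l m => l.setIfInBounds m.toNat 0) itv)[k]? =
      if a ≤ (k : Int) ∧ (k : Int) < b then some 0 else itv[k]? := by
  induction n with
  | zero =>
      intro a b hn ha itv k hk
      rw [PySem.List.pyRange_one_eq_nil (by omega), List.foldl_nil, if_neg (by omega)]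
  | succ n ih =>
      intro a b hn ha itv k hk
      rw [PySem.List.pyRange_one_cons (by omega), List.foldl_cons]
      rw [ih (a + 1) b (by omega) (by omega) _ k (by rw [Array.size_setIfInBounds]; exact hk)]
      by_cases hmid : a + 1 ≤ (k : Int) ∧ (k : Int) < b
      · rw [if_pos hmid, if_pos (show a ≤ (k : Int) ∧ (k : Int) < b by omega)]
      · rw [if_neg hmid, Array.getElem?_setIfInBounds]
        by_cases hcase : a.toNat = k
        · rw [if_pos hcase, if_pos (show a.toNat < itv.size by omega),
            if_pos (show a ≤ (k : Int) ∧ (k : Int) < b by omega)]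
        · rw [if_neg hcase, if_neg (show ¬(a ≤ (k : Int) ∧ (k : Int) < b) by omega)]

lemma size_mask (start : Int) (rest : List (Int × Int)) : ∀ itv : Array Int,
    (rest.foldl (piMask start) itv).size = itv.size := by
  induction rest with
  | nil => intro itv; rfl
  | cons q rest ih =>
      intro itv
      rw [List.foldl_cons, ih, piMask, size_foldl_set]

lemma getElem?_mask (start : Int) (rest : List (Int × Int)) : ∀ (itv : Array Int) (k : Nat),
    k < itv.size →
    (rest.foldl (piMask start) itv)[k]? =
      if start + (k : Int) ∈ covF rest then some 0 else itv[k]? := by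
  induction rest with
  | nil => intro itv k hk; simp [covF]
  | cons q rest ih =>
      intro itv k hk
      rw [List.foldl_cons, ih _ k (by rw [piMask, size_foldl_set]; exact hk)]
      simp only [covF, Finset.mem_union]
      by_cases h1 : start + (k : Int) ∈ covF rest
      · simp [h1]
      · simp only [h1, or_false]
        rw [piMask, getElem?_zeroRange
          (bound (q.2 - start + 1) 0 (itv.size : Int) - bound (q.1 - start) 0 (itv.size : Int)).toNat
          _ _ rfl (le_max_left _ _) itv k hk]
        have hiff : (bound (q.1 - start) 0 (itv.size : Int) ≤ (k : Int) ∧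
            (k : Int) < bound (q.2 - start + 1) 0 (itv.size : Int)) ↔
            start + (k : Int) ∈ iccZ q.1 q.2 := by
          rw [mem_iccZ]; simp only [bound]; omega
        rw [if_congr hiff rfl rfl]
        simp

lemma sum_map_range (g : Nat → Int) (L : Nat) :
    ((List.range L).map g).sum = ∑ k ∈ Finset.range L, g k := by
  induction L with
  | zero => simp
  | succ n ih => rw [List.range_succ, List.map_append, List.sum_append, Finset.sum_range_succ, ih]; simp

lemma sum_ite_card (s : Finset Nat) (P : Nat → Prop) [DecidablePred P] :
    (∑ k ∈ s, if P k then (0 : Int) else 1) = ((s.filter (fun k => ¬ P k)).card : Int) := by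
  rw [Finset.card_filter]
  push_cast
  refine Finset.sum_congr rfl (fun k _ => ?_)
  by_cases h : P k <;> simp [h]

lemma sdiff_eq_image (start e : Int) (rest : List (Int × Int)) :
    iccZ start e \ covF rest =
      ((Finset.range (e - start + 1).toNat).filter
        (fun k : Nat => ¬ start + (k : Int) ∈ covF rest)).image (fun k : Nat => start + (k : Int)) := by
  ext m
  simp only [Finset.mem_sdiff, mem_iccZ, Finset.mem_image, Finset.mem_filter, Finset.mem_range]
  constructor
  · rintro ⟨⟨h1, h2⟩, h3⟩
    refine ⟨(m - start).toNat, ⟨by omega, ?_⟩, by omega⟩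
    have hm : start + ((m - start).toNat : Int) = m := by omega
    rwa [hm]
  · rintro ⟨k, ⟨hk, hnc⟩, rfl⟩
    exact ⟨⟨by omega, by omega⟩, hnc⟩

lemma sum_final (start e : Int) (rest : List (Int × Int)) :
    (rest.foldl (piMask start) (Array.replicate (e - start + 1).toNat 1)).foldl (· + ·) 0
      = ((iccZ start e \ covF rest).card : Int) := by
  have hflist : rest.foldl (piMask start) (Array.replicate (e - start + 1).toNat 1)
      = ((List.range (e - start + 1).toNat).map
          (fun k : Nat => if start + (k : Int) ∈ covF rest then (0 : Int) else 1)).toArray := by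
    apply Array.ext_getElem?
    intro i
    by_cases hi : i < (e - start + 1).toNat
    · rw [getElem?_mask start rest _ i (by simpa using hi)]
      simp only [Array.getElem?_replicate, hi, if_pos, List.getElem?_toArray, List.getElem?_map,
        List.getElem?_range hi, Option.map_some]
      by_cases h : start + (i : Int) ∈ covF rest <;> simp [h]
    · have hlen : (rest.foldl (piMask start) (Array.replicate (e - start + 1).toNat 1)).size
          = (e - start + 1).toNat := by rw [size_mask]; simp
      rw [Array.getElem?_eq_none (by omega), Array.getElem?_eq_none (by simpa using hi)]
  rw [hflist, ← Array.foldl_toList, List.toList_toArray, ← List.sum_eq_foldl,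
    sum_map_range, sum_ite_card, sdiff_eq_image,
    Finset.card_image_of_injective _ (addNat_injective start)]

lemma piLoop_eq (xs : List (Int × Int)) : ∀ acc : Int,
    piLoop acc xs = acc + ((covF xs).card : Int) := by
  induction xs with
  | nil => intro acc; simp [piLoop, covF]
  | cons q rest ih =>
      intro acc
      obtain ⟨s, e⟩ := q
      rw [piLoop, ih, sum_final]
      have := Finset.card_sdiff_add_card (iccZ s e) (covF rest)
      simp only [covF]
      push_cast [← this]
      ring

lemma bLoop_eq (rest : List (Int × Int)) : ∀ (cs ce t : Int), cs ≤ ce →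
    (∀ p ∈ rest, p.1 ≤ p.2) →
    List.Pairwise (fun a b : Int × Int => a.1 ≤ b.1) rest →
    (∀ p ∈ rest, cs ≤ p.1) →
    bFinish (rest.foldl bStep (t, some (cs, ce)))
      = t + ((iccZ cs ce ∪ covF rest).card : Int) := by
  induction rest with
  | nil =>
      intro cs ce t h1 _ _ _
      simp only [List.foldl_nil, bFinish, covF, Finset.union_empty]
      rw [card_iccZ cs ce h1]
  | cons p rest' ih =>
      intro cs ce t h1 hval hpw hlb
      obtain ⟨s, e⟩ := p
      rw [List.foldl_cons]
      have hse : s ≤ e := hval (s, e) List.mem_cons_self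
      have hcs : cs ≤ s := hlb (s, e) List.mem_cons_self
      rw [List.pairwise_cons] at hpw
      by_cases h2 : s ≤ ce + 1
      · by_cases h3 : e > ce
        · have hstep : bStep (t, some (cs, ce)) (s, e) = (t, some (cs, e)) := by
            simp [bStep, h2, h3]
          rw [hstep, ih cs e t (by omega) (fun p hp => hval p (List.mem_cons_of_mem _ hp)) hpw.2
            (fun p hp => hlb p (List.mem_cons_of_mem _ hp))]
          have hset : iccZ cs e = iccZ cs ce ∪ iccZ s e := by
            ext m; simp only [Finset.mem_union, mem_iccZ]; omega
          simp only [covF]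
          rw [hset, Finset.union_assoc]
        · have hstep : bStep (t, some (cs, ce)) (s, e) = (t, some (cs, ce)) := by
            simp [bStep, h2, h3]
          rw [hstep, ih cs ce t h1 (fun p hp => hval p (List.mem_cons_of_mem _ hp)) hpw.2
            (fun p hp => hlb p (List.mem_cons_of_mem _ hp))]
          have hset : iccZ cs ce ∪ iccZ s e = iccZ cs ce := by
            ext m; simp only [Finset.mem_union, mem_iccZ]; omega
          simp only [covF]
          rw [← Finset.union_assoc, hset]
      · have hstep : bStep (t, some (cs, ce)) (s, e) = (t + (ce - cs + 1), some (s, e)) := by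
          simp [bStep, h2]
        rw [hstep, ih s e (t + (ce - cs + 1)) hse
          (fun p hp => hval p (List.mem_cons_of_mem _ hp)) hpw.2 hpw.1]
        simp only [covF]
        have hdisj : Disjoint (iccZ cs ce) (iccZ s e ∪ covF rest') := by
          rw [Finset.disjoint_left]
          intro m hm hm'
          rw [mem_iccZ] at hm
          rcases Finset.mem_union.mp hm' with h | h
          · rw [mem_iccZ] at h; omega
          · rw [mem_covF] at h
            obtain ⟨p, hp, hpm⟩ := h
            have := hpw.1 p hp
            omega
        rw [Finset.card_union_of_disjoint hdisj]
        push_cast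
        rw [card_iccZ cs ce h1]
        ring

lemma covF_filter (xs : List (Int × Int)) :
    covF (xs.filter (fun p => decide (p.1 ≤ p.2))) = covF xs := by
  apply Finset.ext
  intro m
  simp only [mem_covF, List.mem_filter, decide_eq_true_eq]
  constructor
  · rintro ⟨p, ⟨hp, _⟩, h⟩; exact ⟨p, hp, h⟩
  · rintro ⟨p, hp, h1, h2⟩; exact ⟨p, ⟨hp, le_trans h1 h2⟩, h1, h2⟩

lemma covF_mem_eq (xs ys : List (Int × Int)) (h : ∀ p, p ∈ xs ↔ p ∈ ys) :
    covF xs = covF ys := by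
  apply Finset.ext
  intro m
  simp only [mem_covF]
  constructor
  · rintro ⟨p, hp, hm⟩; exact ⟨p, (h p).mp hp, hm⟩
  · rintro ⟨p, hp, hm⟩; exact ⟨p, (h p).mpr hp, hm⟩

-- ===== VERDICT (by name: the statement is the Claim_ definition above) =====
theorem process_intervals_spec : Claim_equal_process_intervals := by
  intro xs _
  unfold Spec_process_intervals process_intervals process_intervals_alt
  show piLoop 0 xs = bFinish (List.foldl bStep (0, none)
    (PySem.List.sorted (xs.filter (fun p => decide (p.1 ≤ p.2))) (fun p => p.1) false))
  rw [piLoop_eq xs 0]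
  have hcov : covF (PySem.List.sorted (xs.filter (fun p => decide (p.1 ≤ p.2))) (fun p => p.1) false)
      = covF xs := by
    rw [covF_mem_eq _ _ (fun p => PySem.List.mem_sorted _ _ _ p), covF_filter]
  have hpw := PySem.List.sorted_pairwise (xs.filter (fun p => decide (p.1 ≤ p.2))) (fun p => p.1)
  have hvalid : ∀ p ∈ PySem.List.sorted (xs.filter (fun p => decide (p.1 ≤ p.2))) (fun p => p.1) false,
      p.1 ≤ p.2 := by
    intro p hp
    rw [PySem.List.mem_sorted, List.mem_filter, decide_eq_true_eq] at hp
    exact hp.2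
  cases hivs : PySem.List.sorted (xs.filter (fun p => decide (p.1 ≤ p.2))) (fun p => p.1) false with
  | nil =>
      rw [hivs] at hcov
      simp [bFinish, ← hcov, covF]
  | cons q rest =>
      rw [hivs] at hcov hpw hvalid
      rw [List.pairwise_cons] at hpw
      rw [List.foldl_cons]
      have hstep : bStep (0, none) q = (0, some q) := rfl
      rw [hstep]
      obtain ⟨qs, qe⟩ := q
      rw [bLoop_eq rest qs qe 0 (hvalid (qs, qe) (List.mem_cons_self))
        (fun p hp => hvalid p (List.mem_cons_of_mem _ hp)) hpw.2 hpw.1]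
      rw [← hcov, covF]
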